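-- pv_equiv track=rewrite | github.com/prvnlhr/Python-DSA | Basics Python/Strings/Practice/Two Substring CodeZen.py | checkTwoSubstringsHelper
-- ===== SOURCE A (Python) =====
-- def checkTwoSubstringsHelper(s, temp):
--     if (len(s) <= 1):
--         return 'no'
--     if (temp == 0 and s[0] == 'A' and s[1] == 'B'):
--         return checkTwoSubstringsHelper(s[2:], 1)
--     elif (temp == 0 and s[0] == 'B' and s[1] == 'A'):
--         return checkTwoSubstringsHelper(s[2:], 2)
--     elif (temp == 1 and s[0] == 'B' and s[1] == 'A'):
--         return 'yes'
--     elif (temp == 2 and s[0] == 'A' and s[1] == 'B'):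
--         return 'yes'
--     return checkTwoSubstringsHelper(s[1:], temp)
-- ===== SOURCE B (Python) =====
-- def checkTwoSubstringsHelper(s, temp):
--     if temp == 1:
--         return 'yes' if 'BA' in s else 'no'
--     if temp == 2:
--         return 'yes' if 'AB' in s else 'no'
--     if temp != 0:
--         return 'no'
--     i = s.find('AB')
--     j = s.find('BA')
--     if i < 0 and j < 0:
--         return 'no'
--     if j < 0 or (0 <= i and i < j):
--         return 'yes' if 'BA' in s[i + 2:] else 'no'
--     return 'yes' if 'AB' in s[j + 2:] else 'no'
-- ===== Notes on version B (the rewrite author's own statement) =====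
-- stated objective: faster
-- what changed: Replaced the O(n^2) slicing recursion (a two-character state machine re-slicing the string at every step) by direct substring searches: locate the first occurrence of 'AB' and of 'BA' with str.find and test the other pattern in the remaining suffix with 'in'.
import Mathlib
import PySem

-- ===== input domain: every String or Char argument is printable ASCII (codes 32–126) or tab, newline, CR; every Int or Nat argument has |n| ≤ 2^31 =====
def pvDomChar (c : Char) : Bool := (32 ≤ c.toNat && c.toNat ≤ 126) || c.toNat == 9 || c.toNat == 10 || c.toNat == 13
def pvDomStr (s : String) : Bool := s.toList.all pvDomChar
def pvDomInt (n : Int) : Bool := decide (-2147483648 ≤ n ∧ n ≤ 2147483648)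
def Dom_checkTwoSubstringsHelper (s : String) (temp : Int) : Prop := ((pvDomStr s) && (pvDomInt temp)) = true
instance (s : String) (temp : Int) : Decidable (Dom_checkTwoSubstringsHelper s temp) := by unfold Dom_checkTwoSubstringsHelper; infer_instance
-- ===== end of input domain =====

-- B replaces A's slicing state-machine recursion by two str.find searches plus one
-- suffix membership test (objective: faster; a timing run measures the speed-up).

-- ===== PORT A =====
-- A's recursion, transliterated on the code-point list: 'len(s) <= 1' is the [] / [_]
-- patterns, s[0] and s[1] are the two heads, s[2:] = rest, s[1:] = b :: rest.
def goA : List Char → Int → String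
  | [], _ => "no"
  | [_], _ => "no"
  | a :: b :: rest, temp =>
    if temp = 0 ∧ a = 'A' ∧ b = 'B' then goA rest 1
    else if temp = 0 ∧ a = 'B' ∧ b = 'A' then goA rest 2
    else if temp = 1 ∧ a = 'B' ∧ b = 'A' then "yes"
    else if temp = 2 ∧ a = 'A' ∧ b = 'B' then "yes"
    else goA (b :: rest) temp

def checkTwoSubstringsHelper (s : String) (temp : Int) : String := goA s.toList temp

-- ===== PORT B =====
-- Source B transliterated on the code-point list: 'sub in s' = PySem.Chars.isIn,
-- s.find(sub) = PySem.Chars.find, s[k:] = PySem.List.slice.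
def goB (l : List Char) (temp : Int) : String :=
  if temp = 1 then (if PySem.Chars.isIn ['B','A'] l then "yes" else "no")
  else if temp = 2 then (if PySem.Chars.isIn ['A','B'] l then "yes" else "no")
  else if temp ≠ 0 then "no"
  else
    let i := PySem.Chars.find l ['A','B']
    let j := PySem.Chars.find l ['B','A']
    if i < 0 ∧ j < 0 then "no"
    else if j < 0 ∨ (0 ≤ i ∧ i < j) then
      (if PySem.Chars.isIn ['B','A'] (PySem.List.slice l (some (i + 2)) none) then "yes" else "no")
    else
      (if PySem.Chars.isIn ['A','B'] (PySem.List.slice l (some (j + 2)) none) then "yes" else "no")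

def checkTwoSubstringsHelper_alt (s : String) (temp : Int) : String := goB s.toList temp

-- ===== PRECONDITION & SPEC =====
def Spec_checkTwoSubstringsHelper (s : String) (temp : Int) (out : String) : Prop := out = checkTwoSubstringsHelper_alt s temp
instance (s : String) (temp : Int) (out : String) : Decidable (Spec_checkTwoSubstringsHelper s temp out) := by unfold Spec_checkTwoSubstringsHelper; infer_instance

-- ===== CLAIM (what is proved, stated in full; the proofs are below) =====
def Claim_equal_checkTwoSubstringsHelper : Prop := ∀ (s : String) (temp : Int), Dom_checkTwoSubstringsHelper s temp → Spec_checkTwoSubstringsHelper s temp (checkTwoSubstringsHelper s temp)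

-- ===== LEMMAS AND PROOFS =====

def bodyZero0 (i j : Int) (l : List Char) : String :=
  if i < 0 ∧ j < 0 then "no"
  else if j < 0 ∨ (0 ≤ i ∧ i < j) then
    (if PySem.Chars.isIn ['B','A'] (PySem.List.slice l (some (i + 2)) none) then "yes" else "no")
  else
    (if PySem.Chars.isIn ['A','B'] (PySem.List.slice l (some (j + 2)) none) then "yes" else "no")

theorem goB_zero (l : List Char) :
    goB l 0 = bodyZero0 (PySem.Chars.find l ['A','B']) (PySem.Chars.find l ['B','A']) l := by
  simp [goB, bodyZero0]

theorem find_eq_zero_of_prefix (l sub : List Char) (h : sub <+: l) :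
    PySem.Chars.find l sub = 0 := by
  have hinf : sub <:+: l := h.isInfix
  have h0 : 0 ≤ PySem.Chars.find l sub := (PySem.Chars.find_nonneg_iff _ _).2 hinf
  obtain ⟨hpre, hmin⟩ := PySem.Chars.find_spec (s := l) (sub := sub) h0
  by_contra hne0
  have hpos : 0 < (PySem.Chars.find l sub).toNat := by omega
  exact hmin 0 hpos (by simpa using h)

theorem pair_prefix_iff (x y a b : Char) (rest : List Char) :
    [x, y] <+: a :: b :: rest ↔ (a = x ∧ b = y) := by
  simp [List.cons_prefix_cons]
  tauto

theorem find_cons_shift (a : Char) (l sub : List Char) (h : ¬ sub <+: a :: l) :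
    PySem.Chars.find (a :: l) sub =
      if PySem.Chars.find l sub = -1 then -1 else PySem.Chars.find l sub + 1 := by
  by_cases hf : PySem.Chars.find l sub = -1
  · rw [if_pos hf]
    rw [PySem.Chars.find_eq_neg_one_iff]
    rw [PySem.Chars.find_eq_neg_one_iff] at hf
    rw [List.infix_cons_iff]
    tauto
  · rw [if_neg hf]
    have h0 : 0 ≤ PySem.Chars.find l sub := by
      have := PySem.Chars.neg_one_le_find (s := l) (sub := sub); omega
    obtain ⟨hpre, hmin⟩ := PySem.Chars.find_spec (s := l) (sub := sub) h0
    have hinf : sub <:+: l := by rwa [← PySem.Chars.find_ne_neg_one_iff]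
    have hinf' : sub <:+: a :: l := (List.infix_cons_iff).mpr (Or.inr hinf)
    have hg0 : 0 ≤ PySem.Chars.find (a :: l) sub := (PySem.Chars.find_nonneg_iff _ _).2 hinf'
    obtain ⟨hgpre, hgmin⟩ := PySem.Chars.find_spec (s := a :: l) (sub := sub) hg0
    set f := PySem.Chars.find l sub with hfdef
    set g := PySem.Chars.find (a :: l) sub with hgdef
    have hgne : g.toNat ≠ 0 := by
      intro h0'
      rw [h0'] at hgpre
      exact h (by simpa using hgpre)
    have hd : (a :: l).drop g.toNat = l.drop (g.toNat - 1) := by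
      cases hg : g.toNat with
      | zero => omega
      | succ n => simp
    have h1 : f.toNat ≤ g.toNat - 1 := by
      by_contra hlt
      exact hmin (g.toNat - 1) (by omega) (by rw [← hd]; exact hgpre)
    have h2 : g.toNat ≤ f.toNat + 1 := by
      by_contra hlt
      exact hgmin (f.toNat + 1) (by omega) (by simpa using hpre)
    omega

theorem isIn_pair_short (x y a : Char) : PySem.Chars.isIn [x, y] [a] = false := by
  rw [PySem.Chars.isIn_eq_false_iff]
  intro h
  have := h.length_le
  simp at this

theorem find_pair_singleton (x y a : Char) : PySem.Chars.find [a] [x, y] = -1 := by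
  rw [PySem.Chars.find_eq_neg_one_iff]
  intro h
  have := h.length_le
  simp at this

theorem isIn_pair_cons_iff (x y a b : Char) (rest : List Char) :
    PySem.Chars.isIn [x, y] (a :: b :: rest) = true ↔
      (a = x ∧ b = y) ∨ PySem.Chars.isIn [x, y] (b :: rest) = true := by
  rw [PySem.Chars.isIn_iff_infix, PySem.Chars.isIn_iff_infix, List.infix_cons_iff,
    pair_prefix_iff]

theorem isIn_pair_cons_of_ne (x y a b : Char) (rest : List Char) (h : ¬(a = x ∧ b = y)) :
    PySem.Chars.isIn [x, y] (a :: b :: rest) = PySem.Chars.isIn [x, y] (b :: rest) := by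
  by_cases h2 : PySem.Chars.isIn [x, y] (b :: rest) = true
  · rw [h2, (isIn_pair_cons_iff x y a b rest).mpr (Or.inr h2)]
  · simp only [Bool.not_eq_true] at h2
    rw [h2, Bool.eq_false_iff]
    intro hc
    rcases (isIn_pair_cons_iff x y a b rest).mp hc with h' | h'
    · exact h h'
    · rw [h2] at h'; exact Bool.false_ne_true h'

theorem find_neg_or_pos_of_not_prefix (l sub : List Char) (h : ¬ sub <+: l) :
    PySem.Chars.find l sub = -1 ∨ 0 < PySem.Chars.find l sub := by
  by_cases hf : PySem.Chars.find l sub = -1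
  · exact Or.inl hf
  · right
    have h0 : 0 ≤ PySem.Chars.find l sub := by
      have := PySem.Chars.neg_one_le_find (s := l) (sub := sub); omega
    obtain ⟨hpre, _⟩ := PySem.Chars.find_spec (s := l) (sub := sub) h0
    rcases lt_or_eq_of_le h0 with h' | h'
    · exact h'
    · exfalso; apply h; rw [← h'] at hpre; simpa using hpre

theorem slice_from_int (l : List Char) (n : Int) (h : 0 ≤ n) :
    PySem.List.slice l (some n) none = l.drop n.toNat := by
  obtain ⟨m, rfl⟩ := Int.eq_ofNat_of_zero_le h
  rw [PySem.List.slice_from_natCast]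
  simp

theorem drop_shift (a : Char) (l : List Char) (x : Int) (h : 0 ≤ x) :
    (a :: l).drop (x + 1).toNat = l.drop x.toNat := by
  have : (x + 1).toNat = x.toNat + 1 := by omega
  rw [this, List.drop_succ_cons]

theorem goA_one (l : List Char) : goA l 1 = if PySem.Chars.isIn ['B','A'] l then "yes" else "no" := by
  induction l with
  | nil => decide
  | cons a t ih =>
    cases t with
    | nil => simp [goA, isIn_pair_short]
    | cons b rest =>
      by_cases hab : a = 'B' ∧ b = 'A'
      · obtain ⟨rfl, rfl⟩ := hab
        rw [(isIn_pair_cons_iff 'B' 'A' 'B' 'A' rest).mpr (Or.inl ⟨rfl, rfl⟩), if_pos rfl]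
        simp [goA]
      · rw [show goA (a :: b :: rest) 1 = goA (b :: rest) 1 by simp [goA, hab],
          isIn_pair_cons_of_ne _ _ _ _ _ hab]
        exact ih

theorem goA_two (l : List Char) : goA l 2 = if PySem.Chars.isIn ['A','B'] l then "yes" else "no" := by
  induction l with
  | nil => decide
  | cons a t ih =>
    cases t with
    | nil => simp [goA, isIn_pair_short]
    | cons b rest =>
      by_cases hab : a = 'A' ∧ b = 'B'
      · obtain ⟨rfl, rfl⟩ := hab
        rw [(isIn_pair_cons_iff 'A' 'B' 'A' 'B' rest).mpr (Or.inl ⟨rfl, rfl⟩), if_pos rfl]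
        simp [goA]
      · rw [show goA (a :: b :: rest) 2 = goA (b :: rest) 2 by simp [goA, hab],
          isIn_pair_cons_of_ne _ _ _ _ _ hab]
        exact ih

theorem goA_other (l : List Char) (t : Int) (h0 : t ≠ 0) (h1 : t ≠ 1) (h2 : t ≠ 2) :
    goA l t = "no" := by
  induction l with
  | nil => simp [goA]
  | cons a s ih =>
    cases s with
    | nil => simp [goA]
    | cons b rest => simpa [goA, h0, h1, h2] using ih

theorem bodyZero0_shift (a : Char) (l : List Char) (i' j' : Int) (hi : -1 ≤ i') (hj : -1 ≤ j') :
    bodyZero0 (if i' = -1 then -1 else i' + 1) (if j' = -1 then -1 else j' + 1) (a :: l) =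
      bodyZero0 i' j' l := by
  by_cases hie : i' = -1 <;> by_cases hje : j' = -1
  · subst hie; subst hje
    simp [bodyZero0]
  · rw [if_pos hie, if_neg hje]
    subst hie
    simp only [bodyZero0]
    rw [slice_from_int (a :: l) _ (by omega), slice_from_int l ((-1) + 2) (by omega),
      slice_from_int (a :: l) (j' + 1 + 2) (by omega), slice_from_int l (j' + 2) (by omega),
      show j' + 1 + 2 = (j' + 2) + 1 by ring, drop_shift a l (j' + 2) (by omega)]
    split_ifs <;> first | rfl | omega
  · rw [if_neg hie, if_pos hje]
    subst hje
    simp only [bodyZero0]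
    rw [slice_from_int (a :: l) (i' + 1 + 2) (by omega), slice_from_int l (i' + 2) (by omega),
      show i' + 1 + 2 = (i' + 2) + 1 by ring, drop_shift a l (i' + 2) (by omega)]
    split_ifs <;> first | rfl | omega
  · rw [if_neg hie, if_neg hje]
    simp only [bodyZero0]
    rw [slice_from_int (a :: l) (i' + 1 + 2) (by omega), slice_from_int l (i' + 2) (by omega),
      slice_from_int (a :: l) (j' + 1 + 2) (by omega), slice_from_int l (j' + 2) (by omega),
      show i' + 1 + 2 = (i' + 2) + 1 by ring, drop_shift a l (i' + 2) (by omega),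
      show j' + 1 + 2 = (j' + 2) + 1 by ring, drop_shift a l (j' + 2) (by omega)]
    split_ifs <;> first | rfl | omega

theorem goA_zero (l : List Char) : goA l 0 = goB l 0 := by
  induction l with
  | nil => decide
  | cons a t ih =>
    cases t with
    | nil =>
      rw [goB_zero, find_pair_singleton, find_pair_singleton]
      simp [goA, bodyZero0]
    | cons b rest =>
      by_cases hAB : a = 'A' ∧ b = 'B'
      · obtain ⟨rfl, rfl⟩ := hAB
        rw [show goA ('A' :: 'B' :: rest) 0 = goA rest 1 by simp [goA], goA_one, goB_zero,
          find_eq_zero_of_prefix _ _ ((pair_prefix_iff _ _ _ _ _).mpr ⟨rfl, rfl⟩)]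
        have hj := find_neg_or_pos_of_not_prefix ('A' :: 'B' :: rest) ['B','A']
          (fun h => by have := (pair_prefix_iff _ _ _ _ _).mp h; simp at this)
        simp only [bodyZero0]
        rw [slice_from_int ('A' :: 'B' :: rest) ((0 : Int) + 2) (by omega),
          show ((0 : Int) + 2).toNat = 2 by decide]
        simp only [List.drop_succ_cons, List.drop_zero]
        split_ifs <;> first | rfl | omega
      · by_cases hBA : a = 'B' ∧ b = 'A'
        · obtain ⟨rfl, rfl⟩ := hBA
          rw [show goA ('B' :: 'A' :: rest) 0 = goA rest 2 by simp [goA], goA_two, goB_zero,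
            find_eq_zero_of_prefix _ _ ((pair_prefix_iff _ _ _ _ _).mpr ⟨rfl, rfl⟩)]
          have hi := find_neg_or_pos_of_not_prefix ('B' :: 'A' :: rest) ['A','B']
            (fun h => by have := (pair_prefix_iff _ _ _ _ _).mp h; simp at this)
          simp only [bodyZero0]
          rw [slice_from_int ('B' :: 'A' :: rest) ((0 : Int) + 2) (by omega),
            show ((0 : Int) + 2).toNat = 2 by decide]
          simp only [List.drop_succ_cons, List.drop_zero]
          split_ifs <;> first | rfl | omega
        · have hpAB : ¬ ['A','B'] <+: a :: b :: rest :=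
            fun h => hAB ((pair_prefix_iff _ _ _ _ _).mp h)
          have hpBA : ¬ ['B','A'] <+: a :: b :: rest :=
            fun h => hBA ((pair_prefix_iff _ _ _ _ _).mp h)
          rw [show goA (a :: b :: rest) 0 = goA (b :: rest) 0 by simp [goA, hAB, hBA], ih,
            goB_zero, goB_zero, find_cons_shift a (b :: rest) ['A','B'] hpAB,
            find_cons_shift a (b :: rest) ['B','A'] hpBA]
          exact (bodyZero0_shift a (b :: rest) _ _
            (PySem.Chars.neg_one_le_find (s := b :: rest) (sub := ['A','B']))
            (PySem.Chars.neg_one_le_find (s := b :: rest) (sub := ['B','A']))).symm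

-- ===== VERDICT (by name: the statement is the Claim_ definition above) =====
theorem checkTwoSubstringsHelper_spec : Claim_equal_checkTwoSubstringsHelper := by
  intro s temp _
  show checkTwoSubstringsHelper s temp = checkTwoSubstringsHelper_alt s temp
  unfold checkTwoSubstringsHelper checkTwoSubstringsHelper_alt
  by_cases h1 : temp = 1
  · subst h1; rw [goA_one]; simp [goB]
  · by_cases h2 : temp = 2
    · subst h2; rw [goA_two]; simp [goB]
    · by_cases h0 : temp = 0
      · subst h0; exact goA_zero _
      · rw [goA_other _ _ h0 h1 h2]; simp [goB, h0, h1, h2]
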